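-- pv_equiv track=rewrite | github.com/k-pipe/beat-analyzer | beat_analyzer.py | _find_and_condense_patterns
-- ===== SOURCE A (Python) =====
-- def _find_and_condense_patterns(sequence, depth):
--     """Find and condense repeating patterns with brackets"""
--     if len(sequence) <= 1:
--         return " ".join(sequence) if sequence else ""
--
--     brackets = ["()", "[]", "{}"]  # Different bracket levels
--     bracket_pair = brackets[min(depth, len(brackets)-1)]
--     open_b, close_b = bracket_pair[0], bracket_pair[1]
--
--     result = []
--     i = 0
--
--     while i < len(sequence):
--         # Check for consecutive identical elements
--         j = i + 1
--         while j < len(sequence) and sequence[j] == sequence[i]: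
--             j += 1
--
--         count = j - i
--         if count > 1:
--             # Multiple identical elements -> use exponent
--             result.append(f"{sequence[i]}^{count}")
--             i = j
--         else:
--             # Single element - check for larger repeating patterns
--             best_pattern_len = 0
--             best_repeat_count = 0
--
--             # Try different pattern lengths
--             for pattern_len in range(2, (len(sequence) - i) // 2 + 1):
--                 if i + pattern_len > len(sequence):
--                     break
--
--                 pattern = sequence[i:i+pattern_len]
--                 repeat_count = 1
--
--                 # Count how many times this pattern repeats
--                 pos = i + pattern_len
--                 while pos + pattern_len <= len(sequence):
--                     if sequence[pos:pos+pattern_len] == pattern: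
--                         repeat_count += 1
--                         pos += pattern_len
--                     else:
--                         break
--
--                 # Keep the longest repeating pattern
--                 if repeat_count >= 2 and pattern_len > best_pattern_len:
--                     best_pattern_len = pattern_len
--                     best_repeat_count = repeat_count
--
--             if best_pattern_len > 0:
--                 # Found a repeating pattern
--                 pattern = sequence[i:i+best_pattern_len]
--                 condensed_pattern = " ".join(pattern)
--                 result.append(f"{open_b}{condensed_pattern}{close_b}^{best_repeat_count}")
--                 i += best_pattern_len * best_repeat_count
--             else:
--                 # No pattern found, just add the element
--                 result.append(sequence[i])
--                 i += 1
--
--     return " ".join(result)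
-- ===== SOURCE B (Python) =====
-- def _lcp(u, v):
--     """Longest common prefix length of lists u and v (v never longer than u)."""
--     k = 0
--     while k < len(v) and u[k] == v[k]:
--         k += 1
--     return k
--
--
-- def _find_and_condense_patterns(sequence, depth):
--     """Find and condense repeating patterns with brackets (suffix-consuming rewriter)."""
--     if len(sequence) <= 1:
--         return " ".join(sequence)
--
--     open_b, close_b = ("()", "[]", "{}")[min(depth, 2)]
--
--     out = []
--     rest = sequence
--     while rest:
--         run = _lcp(rest, rest[1:]) + 1
--         if run > 1:
--             out.append(f"{rest[0]}^{run}")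
--             rest = rest[run:]
--             continue
--         hit = None
--         for L in range(len(rest) // 2, 1, -1):
--             z = _lcp(rest, rest[L:])
--             if z >= L:
--                 hit = (L, z)
--                 break
--         if hit:
--             L, z = hit
--             count = 1 + z // L
--             out.append(f"{open_b}{' '.join(rest[:L])}{close_b}^{count}")
--             rest = rest[L * count:]
--         else:
--             out.append(rest[0])
--             rest = rest[1:]
--     return " ".join(out)
-- ===== Notes on version B (the rewrite author's own statement) =====
-- stated objective: alternative
-- what changed: B is a suffix-consuming rewriter: instead of A's index loop that, for every candidate pattern length, rebuilds and compares slices to count repeats while tracking the best, B shrinks the list itself and uses elementwise longest-common-prefix scans: a run is lcp(rest, rest[1:])+1, the pattern length is the first hit of a descending search for lcp(rest, rest[L:]) >= L, and the repeat count is the closed form 1 + lcp // L, so A's inner block-comparison loop disappears; it trades A's slice allocations for lcp scans at the same worst-case cost.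
-- outside the precondition, e.g. on _find_and_condense_patterns(['a', 'b'], -4): A raises IndexError, B raises IndexError
import Mathlib
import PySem

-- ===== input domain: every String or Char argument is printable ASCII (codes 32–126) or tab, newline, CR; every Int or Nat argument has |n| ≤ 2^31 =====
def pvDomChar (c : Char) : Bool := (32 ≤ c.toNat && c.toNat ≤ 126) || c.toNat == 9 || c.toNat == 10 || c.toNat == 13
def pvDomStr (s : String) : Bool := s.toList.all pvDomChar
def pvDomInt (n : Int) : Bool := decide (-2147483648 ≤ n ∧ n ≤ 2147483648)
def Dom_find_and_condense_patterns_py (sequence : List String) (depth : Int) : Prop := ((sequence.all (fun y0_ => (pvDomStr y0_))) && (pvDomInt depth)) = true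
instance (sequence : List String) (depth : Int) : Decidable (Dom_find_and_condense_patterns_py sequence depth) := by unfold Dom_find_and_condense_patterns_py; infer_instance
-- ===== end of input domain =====

-- B rewrites a shrinking suffix list with longest-common-prefix scans and a closed-form repeat
-- count instead of A's indexed per-length slice-comparison loops (objective: alternative).

-- ===== PORT A =====
-- sequence[a:b] with 0 ≤ a ≤ b nonnegative in-range Nat indices (exact: PySem slice)
def pvSlice (s : List String) (a b : Nat) : List String :=
  PySem.List.slice s (some (a : Int)) (some (b : Int))

-- inner while of A: 'j = i+1; while j < len and sequence[j] == sequence[i]: j += 1'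
-- (fuel only guards totality; j advances by 1 and stops at len, fuel = len sequence suffices)
def pvRunEndA (s : List String) (x : String) (j fuel : Nat) : Nat :=
  match fuel with
  | 0 => j
  | f + 1 =>
    if h : j < s.length then
      (if s[j] = x then pvRunEndA s x (j + 1) f else j)
    else j

-- A's 'while pos + pattern_len <= len: if sequence[pos:pos+pattern_len] == pattern: …'
-- (fuel only guards totality; pos advances by L ≥ 2 each step, fuel = len sequence suffices)
def pvRepCntA (s : List String) (pat : List String) (L pos fuel : Nat) : Nat :=
  match fuel with
  | 0 => 0
  | f + 1 =>
    if pos + L ≤ s.length then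
      (if pvSlice s pos (pos + L) = pat then 1 + pvRepCntA s pat L (pos + L) f else 0)
    else 0

-- A's 'for pattern_len in range(2, (len-i)//2+1)' with its (dead) break and best-tracking
def pvBestA (s : List String) (i : Nat) (ls : List Nat) (bl bc : Nat) : Nat × Nat :=
  match ls with
  | [] => (bl, bc)
  | L :: rest =>
    if s.length < i + L then (bl, bc)   -- 'if i + pattern_len > len(sequence): break'
    else
      let pat := pvSlice s i (i + L)
      let rc := 1 + pvRepCntA s pat L (i + L) s.length
      if 2 ≤ rc ∧ bl < L then pvBestA s i rest L rc else pvBestA s i rest bl bc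

def pvLoopA (s : List String) (ob cb : String) (i fuel : Nat) : List String :=
  match fuel with
  | 0 => []
  | f + 1 =>
    if h : i < s.length then
      let j := pvRunEndA s s[i] (i + 1) s.length
      let count := j - i
      if 1 < count then
        (s[i] ++ "^" ++ PySem.Int.toStr (count : Int)) :: pvLoopA s ob cb j f
      else
        let p := pvBestA s i (List.range' 2 ((s.length - i) / 2 + 1 - 2)) 0 0
        if 0 < p.1 then
          (ob ++ PySem.Str.join " " (pvSlice s i (i + p.1)) ++ cb ++ "^" ++
              PySem.Int.toStr (p.2 : Int)) :: pvLoopA s ob cb (i + p.1 * p.2) f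
        else
          s[i] :: pvLoopA s ob cb (i + 1) f
    else []

def find_and_condense_patterns_py (sequence : List String) (depth : Int) : String :=
  if sequence.length ≤ 1 then
    (if sequence = [] then "" else PySem.Str.join " " sequence)
  else
    let brackets : List String := ["()", "[]", "{}"]
    let bracket_pair := (PySem.List.pyGet? brackets (min depth 2)).getD ""
    let open_b := ((PySem.Str.pyGet? bracket_pair 0).map (fun c => String.ofList [c])).getD ""
    let close_b := ((PySem.Str.pyGet? bracket_pair 1).map (fun c => String.ofList [c])).getD ""
    PySem.Str.join " " (pvLoopA sequence open_b close_b 0 (sequence.length + 1))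

-- ===== PORT B =====
-- B's _lcp over the lists themselves: 'k = 0; while k < len(v) and u[k] == v[k]: k += 1'
-- (structural recursion on the two lists; v is always a proper suffix of u, so u outlives v
--  and the k < len(v) guard is exactly "second list nonempty")
def pvLcp : List String → List String → Nat
  | x :: xs, y :: ys => if x = y then pvLcp xs ys + 1 else 0
  | _, _ => 0

-- B's descending for-loop: the first L with _lcp(rest, rest[L:]) >= L, with that lcp value
def pvFindPat (rest : List String) : List Nat → Option (Nat × Nat)
  | [] => none
  | L :: ls =>
    let z := pvLcp rest (rest.drop L)
    if L ≤ z then some (L, z) else pvFindPat rest ls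

-- B's 'while rest:' over the shrinking suffix (fuel only guards totality; every step drops ≥ 1
-- element of rest, so fuel = len sequence + 1 suffices)
def pvEmitB (ob cb : String) (rest : List String) (fuel : Nat) : List String :=
  match fuel with
  | 0 => []
  | f + 1 =>
    match rest with
    | [] => []
    | x :: tl =>
      let run := pvLcp (x :: tl) tl + 1
      if 1 < run then
        (x ++ "^" ++ PySem.Int.toStr (run : Int)) :: pvEmitB ob cb ((x :: tl).drop run) f
      else
        match pvFindPat (x :: tl) ((List.range' 2 ((x :: tl).length / 2 + 1 - 2)).reverse) with
        | some (L, z) =>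
          let count := 1 + z / L
          (ob ++ PySem.Str.join " " ((x :: tl).take L) ++ cb ++ "^" ++
              PySem.Int.toStr (count : Int)) :: pvEmitB ob cb ((x :: tl).drop (L * count)) f
        | none => x :: pvEmitB ob cb tl f

-- B's 'open_b, close_b = pair' (tuple unpacking of a two-character string; every pair
-- reached here has exactly two characters)
def pvUnpack2 (p : String) : String × String :=
  match p.toList with
  | [a, b] => (String.ofList [a], String.ofList [b])
  | _ => ("", "")

def find_and_condense_patterns_py_alt (sequence : List String) (depth : Int) : String :=
  if sequence.length ≤ 1 then PySem.Str.join " " sequence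
  else
    let bs := pvUnpack2 ((PySem.List.pyGet? ["()", "[]", "{}"] (min depth 2)).getD "")
    PySem.Str.join " " (pvEmitB bs.1 bs.2 sequence (sequence.length + 1))

-- ===== PRECONDITION & SPEC =====
-- Pre_ excludes only depth ≤ -4 with a sequence of length ≥ 2, where Python's
-- brackets[min(depth, 2)] raises IndexError (in A and in B alike).
def Pre_find_and_condense_patterns_py (sequence : List String) (depth : Int) : Prop :=
  sequence.length ≤ 1 ∨ -3 ≤ depth
instance (sequence : List String) (depth : Int) : Decidable (Pre_find_and_condense_patterns_py sequence depth) := by unfold Pre_find_and_condense_patterns_py; infer_instance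

def pvWitness_find_and_condense_patterns_py : List String × Int := (["a", "b", "a", "b"], 0)

def Spec_find_and_condense_patterns_py (sequence : List String) (depth : Int) (out : String) : Prop := out = find_and_condense_patterns_py_alt sequence depth
instance (sequence : List String) (depth : Int) (out : String) : Decidable (Spec_find_and_condense_patterns_py sequence depth out) := by unfold Spec_find_and_condense_patterns_py; infer_instance

-- ===== CLAIM (what is proved, stated in full; the proofs are below) =====
def Claim_equal_find_and_condense_patterns_py : Prop := ∀ (sequence : List String) (depth : Int), Dom_find_and_condense_patterns_py sequence depth → Pre_find_and_condense_patterns_py sequence depth → Spec_find_and_condense_patterns_py sequence depth (find_and_condense_patterns_py sequence depth)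

-- ===== LEMMAS AND PROOFS =====

-- length of the leading run of x
def runLen (x : String) : List String → Nat
  | [] => 0
  | y :: ys => if y = x then runLen x ys + 1 else 0

-- number of leading whole copies of p in v
def repL (p v : List String) : Nat :=
  if h : p ≠ [] ∧ v.take p.length = p then repL p (v.drop p.length) + 1 else 0
termination_by v.length
decreasing_by
  have h1 : p.length ≤ v.length := by
    have := congrArg List.length h.2
    simp at this
    omega
  have h0 : 0 < p.length := List.length_pos_iff.mpr h.1
  simp [List.length_drop]
  omega

lemma pvLcp_nil_right (u : List String) : pvLcp u [] = 0 := by cases u <;> rfl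

lemma pvLcp_append_left (p x y : List String) :
    pvLcp (p ++ x) (p ++ y) = p.length + pvLcp x y := by
  induction p with
  | nil => simp
  | cons a as ih => simp [pvLcp, ih]; omega

lemma take_eq_of_le_pvLcp (m : Nat) : ∀ (u v : List String), m ≤ pvLcp u v →
    u.take m = v.take m := by
  induction m with
  | zero => intro u v _; simp
  | succ m ih =>
    intro u v h
    match u, v with
    | [], _ => simp [pvLcp] at h
    | _ :: _, [] => simp [pvLcp] at h
    | x :: xs, y :: ys =>
      simp only [pvLcp] at h
      by_cases hxy : x = y
      · simp [hxy] at h ⊢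
        exact ih xs ys (by omega)
      · simp [hxy] at h

lemma runLen_eq_pvLcp (x : String) (v : List String) :
    runLen x v = pvLcp (x :: v) v := by
  induction v generalizing x with
  | nil => rfl
  | cons y ys ih =>
    simp only [runLen, pvLcp]
    by_cases h : y = x
    · subst h
      rw [if_pos rfl, if_pos rfl, ih]
    · rw [if_neg h, if_neg (fun hh => h hh.symm)]

lemma runEndA_eq (s : List String) (x : String) : ∀ (fuel j : Nat), s.length ≤ j + fuel →
    pvRunEndA s x j fuel = j + runLen x (s.drop j) := by
  intro fuel
  induction fuel with
  | zero =>
    intro j hj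
    rw [pvRunEndA, List.drop_eq_nil_of_le (by omega : s.length ≤ j)]
    simp [runLen]
  | succ n ih =>
    intro j hfj
    rw [pvRunEndA]
    by_cases hj : j < s.length
    · have hdrop : s[j] :: s.drop (j + 1) = s.drop j := List.getElem_cons_drop hj
      simp only [hj, dif_pos]
      by_cases hx : s[j] = x
      · rw [if_pos hx, ih (j + 1) (by omega), ← hdrop]
        simp [runLen, hx]
        omega
      · rw [if_neg hx, ← hdrop]
        simp [runLen, hx]
    · rw [dif_neg hj, List.drop_eq_nil_of_le (by omega : s.length ≤ j)]
      simp [runLen]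

lemma repL_eq_div (L : Nat) (hL : 0 < L) : ∀ (N : Nat) (v p : List String), v.length ≤ N →
    p.length = L → repL p v = pvLcp (p ++ v) v / L := by
  intro N
  induction N with
  | zero =>
    intro v p hv hp
    have hv0 : v = [] := List.eq_nil_of_length_eq_zero (by omega)
    subst hv0
    rw [repL]
    have hne : ¬ (p ≠ [] ∧ ([] : List String).take p.length = p) := by
      rintro ⟨h1, h2⟩
      simp at h2
      exact h1 h2
    simp [pvLcp_nil_right]
  | succ N ih =>
    intro v p hv hp
    by_cases htake : v.take p.length = p
    · have hpne : p ≠ [] := by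
        intro h; subst h; simp at hp; omega
      have hplen : p.length ≤ v.length := by
        have := congrArg List.length htake
        simp at this; omega
      set w := v.drop p.length with hw
      have hvw : v = p ++ w := by
        conv_lhs => rw [← List.take_append_drop p.length v]
        rw [htake, ← hw]
      rw [repL]
      simp only [hpne, ne_eq, not_false_iff, htake, and_self, dif_pos, ← hw]
      have hwlen : w.length ≤ N := by
        rw [hw]; simp; omega
      have ihw := ih w p hwlen hp
      rw [ihw]
      have hz : pvLcp (p ++ v) v = L + pvLcp (p ++ w) w := by
        calc pvLcp (p ++ v) v = pvLcp (p ++ v) (p ++ w) := by rw [← hvw]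
          _ = p.length + pvLcp v w := pvLcp_append_left p v w
          _ = L + pvLcp (p ++ w) w := by rw [hp, ← hvw]
      rw [hz, Nat.add_comm L, Nat.add_div_right _ hL]
    · rw [repL]
      have hne : ¬ (p ≠ [] ∧ v.take p.length = p) := by
        rintro ⟨_, h2⟩; exact htake h2
      simp only [hne, dif_neg, not_false_iff]
      have hlt : pvLcp (p ++ v) v < L := by
        by_contra hge
        rw [Nat.not_lt] at hge
        have := take_eq_of_le_pvLcp L (p ++ v) v hge
        rw [← hp] at this
        rw [List.take_left] at this
        exact htake this.symm
      exact (Nat.div_eq_of_lt hlt).symm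

lemma slice_take (s : List String) (i L : Nat) : pvSlice s i (i + L) = (s.drop i).take L := by
  unfold pvSlice
  rw [show ((i + L : Nat) : Int) = ((i : Nat) : Int) + ((L : Nat) : Int) by push_cast; ring]
  exact PySem.List.slice_natCast_add s i L

lemma repCntA_eq (s : List String) (pat : List String) (L : Nat) (hp : pat.length = L)
    (hL : 0 < L) : ∀ (fuel pos : Nat), s.length ≤ pos + fuel * L →
    pvRepCntA s pat L pos fuel = repL pat (s.drop pos) := by
  intro fuel
  induction fuel with
  | zero =>
    intro pos hpos
    simp only [Nat.zero_mul, Nat.add_zero] at hpos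
    rw [pvRepCntA, repL]
    have hnil : s.drop pos = [] := List.drop_eq_nil_of_le hpos
    have hne : ¬ (pat ≠ [] ∧ (s.drop pos).take pat.length = pat) := by
      rintro ⟨h1, h2⟩
      rw [hnil] at h2
      simp at h2
      exact h1 h2
    simp [hne]
  | succ f ih =>
    intro pos hpos
    rw [pvRepCntA]
    by_cases hb : pos + L ≤ s.length
    · simp only [hb, if_pos]
      have hsl : pvSlice s pos (pos + L) = (s.drop pos).take L := slice_take s pos L
      by_cases heq : pvSlice s pos (pos + L) = pat
      · rw [if_pos heq]
        rw [ih (pos + L) (by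
          have hmul : (f + 1) * L = f * L + L := by ring
          omega)]
        conv_rhs => rw [repL]
        have htk : (s.drop pos).take pat.length = pat := by
          rw [hp, ← hsl]; exact heq
        have hpne : pat ≠ [] := by
          intro h; subst h; simp at hp; omega
        have harg : (s.drop pos).drop pat.length = s.drop (pos + L) := by
          rw [List.drop_drop, hp]
        simp only [hpne, ne_eq, not_false_iff, htk, and_self, dif_pos, harg]
        omega
      · rw [if_neg heq]
        rw [repL]
        have hne : ¬ (pat ≠ [] ∧ (s.drop pos).take pat.length = pat) := by
          rintro ⟨_, h2⟩
          rw [hp, ← hsl] at h2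
          exact heq h2
        simp [hne]
    · simp only [hb, if_neg, not_false_iff]
      rw [repL]
      have hne : ¬ (pat ≠ [] ∧ (s.drop pos).take pat.length = pat) := by
        rintro ⟨_, h2⟩
        have := congrArg List.length h2
        simp [hp] at this
        omega
      simp [hne]

lemma findPat_some (rest : List String) : ∀ (ls : List Nat) (r : Nat × Nat),
    pvFindPat rest ls = some r → r.1 ∈ ls ∧ r.2 = pvLcp rest (rest.drop r.1) := by
  intro ls
  induction ls with
  | nil => intro r h; simp [pvFindPat] at h
  | cons L ls ih =>
    intro r h
    rw [pvFindPat] at h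
    by_cases hz : L ≤ pvLcp rest (rest.drop L)
    · simp only [hz, if_pos] at h
      cases h
      exact ⟨List.mem_cons_self, rfl⟩
    · simp only [hz, if_neg, not_false_iff] at h
      rcases ih r h with ⟨h1, h2⟩
      exact ⟨List.mem_cons_of_mem _ h1, h2⟩

lemma findPat_append (rest : List String) (xs : List Nat) (L : Nat) :
    pvFindPat rest (xs ++ [L]) =
      (match pvFindPat rest xs with
       | some r => some r
       | none => if L ≤ pvLcp rest (rest.drop L)
                 then some (L, pvLcp rest (rest.drop L)) else none) := by
  induction xs with
  | nil => simp [pvFindPat]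
  | cons M ms ih =>
    rw [List.cons_append, pvFindPat]
    conv_rhs => rw [pvFindPat]
    by_cases hz : M ≤ pvLcp rest (rest.drop M)
    · simp [hz]
    · simp only [hz, if_neg, not_false_iff]
      exact ih

-- A's repeat count for the pattern at i of length L is the closed form 1 + lcp/L (as a Nat fact)
lemma rc_closed (s : List String) (i L : Nat) (hL : 0 < L) (hin : i + 2 * L ≤ s.length) :
    1 + pvRepCntA s (pvSlice s i (i + L)) L (i + L) s.length
      = 1 + pvLcp (s.drop i) (s.drop (i + L)) / L := by
  have hpat : (pvSlice s i (i + L)).length = L := by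
    rw [slice_take]; simp; omega
  have hfuel : s.length ≤ (i + L) + s.length * L := by
    have : s.length ≤ s.length * L := Nat.le_mul_of_pos_right _ hL
    omega
  have h1 : pvRepCntA s (pvSlice s i (i + L)) L (i + L) s.length
      = repL (pvSlice s i (i + L)) (s.drop (i + L)) := by
    exact repCntA_eq s (pvSlice s i (i + L)) L hpat hL s.length (i + L) hfuel
  rw [h1, repL_eq_div L hL (s.drop (i + L)).length _ _ (le_refl _) hpat]
  have hdd : (s.drop i).drop L = s.drop (i + L) := by
    rw [List.drop_drop]
  have hfull : pvSlice s i (i + L) ++ s.drop (i + L) = s.drop i := by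
    rw [slice_take, ← hdd, List.take_append_drop]
  rw [hfull]

def pvPick (d : Nat × Nat) : Option (Nat × Nat) → Nat × Nat
  | none => d
  | some (L, z) => (L, 1 + z / L)

lemma drop_drop_comm (s : List String) (i L : Nat) :
    (s.drop i).drop L = s.drop (i + L) := by
  rw [List.drop_drop]

lemma bestA_eq (s : List String) (i : Nat) : ∀ (ls : List Nat) (bl bc : Nat),
    ls.Pairwise (· < ·) → (∀ L ∈ ls, 0 < L ∧ i + 2 * L ≤ s.length ∧ bl < L) →
    pvBestA s i ls bl bc = pvPick (bl, bc) (pvFindPat (s.drop i) ls.reverse) := by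
  intro ls
  induction ls with
  | nil => intro bl bc _ _; rfl
  | cons L rest ih =>
    intro bl bc hpw hmem
    rcases hmem L List.mem_cons_self with ⟨hL0, hLin, hblL⟩
    rw [pvBestA]
    have hnb : ¬ s.length < i + L := by omega
    simp only [hnb, if_neg, not_false_iff]
    have hz : pvLcp (s.drop i) ((s.drop i).drop L) = pvLcp (s.drop i) (s.drop (i + L)) := by
      rw [drop_drop_comm]
    have hrc : 1 + pvRepCntA s (pvSlice s i (i + L)) L (i + L) s.length
        = 1 + pvLcp (s.drop i) (s.drop (i + L)) / L := rc_closed s i L hL0 hLin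
    have hgood : (2 ≤ 1 + pvRepCntA s (pvSlice s i (i + L)) L (i + L) s.length ∧ bl < L)
        ↔ L ≤ pvLcp (s.drop i) ((s.drop i).drop L) := by
      rw [hz]
      constructor
      · rintro ⟨h2, _⟩
        rw [hrc] at h2
        have : 1 ≤ pvLcp (s.drop i) (s.drop (i + L)) / L := by omega
        exact (Nat.one_le_div_iff hL0).mp this
      · intro hle
        refine ⟨?_, hblL⟩
        rw [hrc]
        have : 1 ≤ pvLcp (s.drop i) (s.drop (i + L)) / L := (Nat.one_le_div_iff hL0).mpr hle
        omega
    rw [List.reverse_cons, findPat_append]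
    rw [List.pairwise_cons] at hpw
    by_cases hg : L ≤ pvLcp (s.drop i) ((s.drop i).drop L)
    · rw [if_pos (hgood.mpr hg)]
      rw [ih L (1 + pvRepCntA s (pvSlice s i (i + L)) L (i + L) s.length) hpw.2
        (fun M hM => ⟨(hmem M (List.mem_cons_of_mem _ hM)).1,
          (hmem M (List.mem_cons_of_mem _ hM)).2.1, hpw.1 M hM⟩)]
      cases hfb : pvFindPat (s.drop i) rest.reverse with
      | none =>
        simp only [pvPick, if_pos hg]
        rw [hrc, hz]
      | some r =>
        rcases r with ⟨M, zM⟩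
        rfl
    · rw [if_neg (fun hc => hg (hgood.mp hc))]
      rw [ih bl bc hpw.2
        (fun M hM => ⟨(hmem M (List.mem_cons_of_mem _ hM)).1,
          (hmem M (List.mem_cons_of_mem _ hM)).2.1, (hmem M (List.mem_cons_of_mem _ hM)).2.2⟩)]
      cases hfb : pvFindPat (s.drop i) rest.reverse with
      | none => simp only [pvPick, if_neg hg]
      | some r => rcases r with ⟨M, zM⟩; rfl

lemma loop_eq (s : List String) (ob cb : String) : ∀ (fuel i : Nat),
    pvLoopA s ob cb i fuel = pvEmitB ob cb (s.drop i) fuel := by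
  intro fuel
  induction fuel with
  | zero => intro i; rfl
  | succ f ih =>
    intro i
    by_cases hi : i < s.length
    · have hdrop : s[i] :: s.drop (i + 1) = s.drop i := List.getElem_cons_drop hi
      rw [pvLoopA, ← hdrop, pvEmitB]
      simp only [hi, dif_pos]
      have hcount : pvRunEndA s s[i] (i + 1) s.length - i
          = pvLcp (s[i] :: s.drop (i + 1)) (s.drop (i + 1)) + 1 := by
        rw [runEndA_eq s s[i] s.length (i + 1) (by omega)]
        rw [show s.drop (i + 1) = s.drop (i + 1) from rfl]
        rw [← runLen_eq_pvLcp]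
        omega
      rw [hcount]
      by_cases hrun : 1 < pvLcp (s[i] :: s.drop (i + 1)) (s.drop (i + 1)) + 1
      · rw [if_pos hrun, if_pos hrun]
        have hj : pvRunEndA s s[i] (i + 1) s.length
            = i + (pvLcp (s[i] :: s.drop (i + 1)) (s.drop (i + 1)) + 1) := by
          have hge : i ≤ pvRunEndA s s[i] (i + 1) s.length := by
            rw [runEndA_eq s s[i] s.length (i + 1) (by omega)]; omega
          omega
        rw [hj, ih, hdrop, drop_drop_comm]
      · rw [if_neg hrun, if_neg hrun]
        have hlenr : (s[i] :: s.drop (i + 1)).length = s.length - i := by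
          rw [hdrop]; simp
        rw [hlenr]
        have hbest := bestA_eq s i (List.range' 2 ((s.length - i) / 2 + 1 - 2)) 0 0
          (List.pairwise_lt_range' 1 Nat.one_pos)
          (by
            intro L hL
            rw [List.mem_range'_1] at hL
            refine ⟨by omega, ?_, by omega⟩
            have hLle : L ≤ (s.length - i) / 2 := by omega
            have h3 : 2 * ((s.length - i) / 2) ≤ s.length - i := by
              have := Nat.div_mul_le_self (s.length - i) 2
              omega
            omega)
        rw [hbest, hdrop]
        cases hfb : pvFindPat (s.drop i) (List.range' 2 ((s.length - i) / 2 + 1 - 2)).reverse with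
        | none =>
          simp only [pvPick]
          rw [if_neg (by decide : ¬ (0:Nat) < ((0, 0) : Nat × Nat).1)]
          have := ih (i + 1)
          rw [this]
        | some r =>
          rcases r with ⟨L, z⟩
          rcases findPat_some (s.drop i) _ _ hfb with ⟨hmem, hzval⟩
          rw [List.mem_reverse, List.mem_range'_1] at hmem
          simp only [pvPick]
          have hLpos : 0 < ((L, 1 + z / L) : Nat × Nat).1 := by
            show 0 < L; omega
          rw [if_pos hLpos]
          have htk : pvSlice s i (i + L) = (s.drop i).take L := slice_take s i L
          rw [htk, ih (i + L * (1 + z / L)), drop_drop_comm]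
    · rw [pvLoopA, dif_neg hi, List.drop_eq_nil_of_le (by omega : s.length ≤ i), pvEmitB]

lemma unpack_fst (p : String) (hp : p = "()" ∨ p = "[]" ∨ p = "{}" ∨ p = "") :
    ((PySem.Str.pyGet? p 0).map (fun c => String.ofList [c])).getD "" = (pvUnpack2 p).1 := by
  rcases hp with h | h | h | h <;> subst h <;> decide

lemma unpack_snd (p : String) (hp : p = "()" ∨ p = "[]" ∨ p = "{}" ∨ p = "") :
    ((PySem.Str.pyGet? p 1).map (fun c => String.ofList [c])).getD "" = (pvUnpack2 p).2 := by
  rcases hp with h | h | h | h <;> subst h <;> decide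

lemma pair_cases (depth : Int) :
    (PySem.List.pyGet? ["()", "[]", "{}"] (min depth 2)).getD "" = "()" ∨
    (PySem.List.pyGet? ["()", "[]", "{}"] (min depth 2)).getD "" = "[]" ∨
    (PySem.List.pyGet? ["()", "[]", "{}"] (min depth 2)).getD "" = "{}" ∨
    (PySem.List.pyGet? ["()", "[]", "{}"] (min depth 2)).getD "" = "" := by
  cases h : PySem.List.pyGet? ["()", "[]", "{}"] (min depth 2) with
  | none => right; right; right; rfl
  | some x =>
    have hx : x ∈ ["()", "[]", "{}"] := PySem.List.mem_of_pyGet?_eq_some (h := h)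
    simp only [Option.getD_some]
    simp only [List.mem_cons] at hx
    tauto

-- ===== VERDICT (by name: the statement is the Claim_ definition above) =====
theorem find_and_condense_patterns_py_spec : Claim_equal_find_and_condense_patterns_py := by
  intro sequence depth _ _
  unfold Spec_find_and_condense_patterns_py
  unfold find_and_condense_patterns_py find_and_condense_patterns_py_alt
  by_cases hlen : sequence.length ≤ 1
  · simp only [hlen, if_pos]
    cases sequence with
    | nil => rfl
    | cons x xs => simp
  · simp only [hlen, if_neg, not_false_iff]
    rw [loop_eq]
    rw [unpack_fst _ (pair_cases depth), unpack_snd _ (pair_cases depth)]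
    simp
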